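-- pv_equiv track=rewrite | github.com/felipesud/byu-idaho | cse111/week03/esteem.py | get_positive
-- ===== SOURCE A (Python) =====
-- def get_positive(answers):
--     score = 0
--     for i in answers:
--         if i == "D":
--             score += 0
--         if i == "d":
--             score += 1
--         if i == "a":
--             score += 2
--         if i == "A":
--             score += 3
--     return score
-- ===== SOURCE B (Python) =====
-- def get_positive(answers):
--     return answers.count("d") + 2 * answers.count("a") + 3 * answers.count("A")
-- ===== Notes on version B (the rewrite author's own statement) =====
-- stated objective: simpler
-- what changed: Replaces the per-element if-chain accumulator loop with three staged list.count passes combined in a closed-form weighted sum (one line, no loop of its own).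
import Mathlib
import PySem

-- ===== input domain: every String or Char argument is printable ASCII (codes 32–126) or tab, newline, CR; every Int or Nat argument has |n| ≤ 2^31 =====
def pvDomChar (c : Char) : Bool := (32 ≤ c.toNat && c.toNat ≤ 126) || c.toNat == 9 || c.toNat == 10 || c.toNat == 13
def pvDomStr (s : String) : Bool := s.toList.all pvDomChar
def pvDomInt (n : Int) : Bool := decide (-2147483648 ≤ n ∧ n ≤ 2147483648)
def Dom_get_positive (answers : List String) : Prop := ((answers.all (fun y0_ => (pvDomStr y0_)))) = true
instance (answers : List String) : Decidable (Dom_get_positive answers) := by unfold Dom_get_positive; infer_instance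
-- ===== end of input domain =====

-- B replaces the accumulator loop with three staged list.count passes and a weighted sum (simpler; same O(n) cost).
-- ===== PORT A =====
def get_positive (answers : List String) : Int :=
  answers.foldl (fun score i =>
    let score := if i == "D" then score + 0 else score
    let score := if i == "d" then score + 1 else score
    let score := if i == "a" then score + 2 else score
    let score := if i == "A" then score + 3 else score
    score) 0

-- ===== PORT B =====
-- B: answers.count("d") + 2*answers.count("a") + 3*answers.count("A")
def get_positive_alt (answers : List String) : Int :=
  (PySem.List.count answers "d" : Int) + 2 * (PySem.List.count answers "a" : Int)
    + 3 * (PySem.List.count answers "A" : Int)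

-- ===== PRECONDITION & SPEC =====
def Spec_get_positive (answers : List String) (out : Int) : Prop := out = get_positive_alt answers
instance (answers : List String) (out : Int) : Decidable (Spec_get_positive answers out) := by unfold Spec_get_positive; infer_instance

-- ===== CLAIM (what is proved, stated in full; the proofs are below) =====
def Claim_equal_get_positive : Prop := ∀ (answers : List String), Dom_get_positive answers → Spec_get_positive answers (get_positive answers)

-- ===== LEMMAS AND PROOFS =====
theorem pv_foldl_count (l : List String) (s : Int) :
    l.foldl (fun score i =>
      let score := if i == "D" then score + 0 else score
      let score := if i == "d" then score + 1 else score
      let score := if i == "a" then score + 2 else score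
      let score := if i == "A" then score + 3 else score
      score) s
    = s + l.count "d" + 2 * l.count "a" + 3 * l.count "A" := by
  induction l generalizing s with
  | nil => simp
  | cons x xs ih =>
    simp only [List.foldl_cons, ih, List.count_cons]
    by_cases h1 : x = "D" <;> by_cases h2 : x = "d" <;> by_cases h3 : x = "a" <;>
      by_cases h4 : x = "A" <;>
      simp_all <;> ring

-- ===== VERDICT (by name: the statement is the Claim_ definition above) =====
theorem get_positive_spec : Claim_equal_get_positive := by
  intro answers _
  unfold Spec_get_positive get_positive get_positive_alt
  simp only [PySem.List.count_eq, pv_foldl_count]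
  ring
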